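-- pv_equiv track=rewrite | github.com/Mohammad-mahdi-V/math-help | back/general/views.py | check_variable_depths
-- ===== SOURCE A (Python) =====
-- def check_variable_depths(expression: str) -> dict:
--     """
--     بررسی عمق هر متغیر در عبارت.
--     متغیرهایی که در بخش‌های کوتیشن قرار دارند، نادیده گرفته می‌شوند.
--     این تابع یک دیکشنری برمی‌گرداند که کلید آن نام متغیر و مقدار آن لیستی از عمق‌های حضور آن در عبارت است.
--     """
--     depths = {}
--     current_depth = 0
--     i = 0
--     while i < len(expression):
--         ch = expression[i]
--         if ch == '"':
--             i += 1
--             while i < len(expression) and expression[i] != '"':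
--                 i += 1
--             i += 1
--             continue
--         elif ch == '{':
--             current_depth += 1
--             i += 1
--             continue
--         elif ch == '}':
--             current_depth -= 1
--             i += 1
--             continue
--         elif ch.isalpha() or ch == '_':
--             start = i
--             while i < len(expression) and (expression[i].isalnum() or expression[i] == '_'):
--                 i += 1
--             token = expression[start:i]
--             if token not in depths:
--                 depths[token] = []
--             depths[token].append(current_depth)
--             continue
--         else:
--             i += 1
--     return depths
-- ===== SOURCE B (Python) =====
-- def check_variable_depths(expression: str) -> dict:
--     # Phase 1: lex the string into a token stream ('{', '}', or a name),
--     # dropping quoted sections with a small state machine.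
--     tokens = []
--     buf = []
--     in_quote = False
--     for ch in expression:
--         if in_quote:
--             if ch == '"':
--                 in_quote = False
--             continue
--         if (ch.isalnum() or ch == '_') and (buf or ch == '_' or ch.isalpha()):
--             buf.append(ch)
--             continue
--         if buf:
--             tokens.append(('name', ''.join(buf)))
--             buf = []
--         if ch == '"':
--             in_quote = True
--         elif ch == '{':
--             tokens.append(('open',))
--         elif ch == '}':
--             tokens.append(('close',))
--     if buf:
--         tokens.append(('name', ''.join(buf)))
--     # Phase 2: fold over the token stream, tracking the brace depth.
--     depths = {}
--     depth = 0
--     for tok in tokens: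
--         if tok[0] == 'open':
--             depth += 1
--         elif tok[0] == 'close':
--             depth -= 1
--         else:
--             depths.setdefault(tok[1], []).append(depth)
--     return depths
-- ===== Notes on version B (the rewrite author's own statement) =====
-- stated objective: alternative
-- what changed: Replaced A's index-based while loop with nested inner scans (quote skipping, token consumption) and immediate dict updates by a two-phase design: a single-pass state-machine lexer that turns the string into a token stream ('{', '}', name), followed by a fold over the tokens that tracks brace depth and groups depths per name.
import Mathlib
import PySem

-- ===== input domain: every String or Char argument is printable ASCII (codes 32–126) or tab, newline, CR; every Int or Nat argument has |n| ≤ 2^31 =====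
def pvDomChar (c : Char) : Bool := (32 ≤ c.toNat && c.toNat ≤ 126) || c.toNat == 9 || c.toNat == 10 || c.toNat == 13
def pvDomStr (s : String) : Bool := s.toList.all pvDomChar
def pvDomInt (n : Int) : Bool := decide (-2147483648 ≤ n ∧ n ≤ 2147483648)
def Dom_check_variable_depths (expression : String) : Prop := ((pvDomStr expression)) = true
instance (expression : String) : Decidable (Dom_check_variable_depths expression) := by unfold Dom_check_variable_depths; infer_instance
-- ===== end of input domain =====

-- B replaces A's index-based scan (nested while loops, immediate dict updates) by a two-phase
-- tokenize-then-fold design (objective: simpler/alternative; equal cost). Return-value equivalence only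
-- (A mutates nothing observable).

-- ===== PORT A =====
-- A's while loops are transliterated with a structural fuel counter (cs.length is always enough,
-- since every iteration advances the index); this only makes the same computation total.

-- inner while of the quote-skipping branch: first index k ≥ i with expression[k] == '"' (or len)
def pvAQuote (cs : List Char) (fuel i : Nat) : Nat :=
  match fuel with
  | 0 => i
  | fuel + 1 =>
    if h : i < cs.length then
      if cs[i] == '"' then i else pvAQuote cs fuel (i + 1)
    else i

-- inner while of the token branch: first index k ≥ i with expression[k] not alnum/underscore (or len)
def pvAScan (cs : List Char) (fuel i : Nat) : Nat :=
  match fuel with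
  | 0 => i
  | fuel + 1 =>
    if h : i < cs.length then
      if cs[i].isAlphanum || cs[i] == '_' then pvAScan cs fuel (i + 1) else i
    else i

-- A's main while loop; expression[start:i] with 0 ≤ start ≤ i ≤ len is exactly take/drop here
def pvALoop (cs : List Char) (fuel : Nat) (i : Nat) (depth : Int)
    (depths : PySem.Dict String (List Int)) : PySem.Dict String (List Int) :=
  match fuel with
  | 0 => depths
  | fuel + 1 =>
    if h : i < cs.length then
      let ch := cs[i]
      if ch == '"' then
        pvALoop cs fuel (pvAQuote cs cs.length (i + 1) + 1) depth depths
      else if ch == '{' then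
        pvALoop cs fuel (i + 1) (depth + 1) depths
      else if ch == '}' then
        pvALoop cs fuel (i + 1) (depth - 1) depths
      else if ch.isAlpha || ch == '_' then
        let j := pvAScan cs cs.length i
        let token := String.mk ((cs.drop i).take (j - i))
        -- if token not in depths: depths[token] = []
        let d1 := if depths.contains token then depths else depths.insert token []
        -- depths[token].append(current_depth)  (key is present in d1)
        pvALoop cs fuel j depth (d1.insert token (d1.getD token [] ++ [depth]))
      else
        pvALoop cs fuel (i + 1) depth depths
    else depths

def check_variable_depths (expression : String) : List (String × List Int) :=
  (pvALoop expression.toList expression.toList.length 0 0 PySem.Dict.empty).items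

-- ===== PORT B =====
inductive PvTok where
  | name : String → PvTok
  | op : PvTok
  | cl : PvTok
deriving DecidableEq, Repr

-- if buf: tokens.append(('name', ''.join(buf)))
def pvFlush (buf : List Char) : List PvTok :=
  if buf.isEmpty then [] else [PvTok.name (String.mk buf)]

-- the body of B's phase-1 for loop (state: tokens so far, current name buffer, in_quote flag)
def pvBStep (st : List PvTok × List Char × Bool) (ch : Char) : List PvTok × List Char × Bool :=
  let (toks, buf, inq) := st
  if inq then
    (toks, buf, ch != '"')
  else if (ch.isAlphanum || ch == '_') && (!buf.isEmpty || ch == '_' || ch.isAlpha) then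
    (toks, buf ++ [ch], false)
  else
    let toks2 := toks ++ pvFlush buf
    if ch == '"' then (toks2, [], true)
    else if ch == '{' then (toks2 ++ [PvTok.op], [], false)
    else if ch == '}' then (toks2 ++ [PvTok.cl], [], false)
    else (toks2, [], false)

-- phase 1: lex the whole string into a token stream
def pvBLex (cs : List Char) : List PvTok :=
  let st := cs.foldl pvBStep ([], [], false)
  st.1 ++ pvFlush st.2.1

-- the body of B's phase-2 for loop (state: current depth, depths dict)
def pvBEvalStep (st : Int × PySem.Dict String (List Int)) (t : PvTok) :
    Int × PySem.Dict String (List Int) :=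
  match t with
  | PvTok.op => (st.1 + 1, st.2)
  | PvTok.cl => (st.1 - 1, st.2)
  | PvTok.name s => (st.1, st.2.modify s [] (fun l => l ++ [st.1]))

def check_variable_depths_alt (expression : String) : List (String × List Int) :=
  ((pvBLex expression.toList).foldl pvBEvalStep (0, PySem.Dict.empty)).2.items

-- ===== PRECONDITION & SPEC =====
def Spec_check_variable_depths (expression : String) (out : List (String × List Int)) : Prop := out = check_variable_depths_alt expression
instance (expression : String) (out : List (String × List Int)) : Decidable (Spec_check_variable_depths expression out) := by unfold Spec_check_variable_depths; infer_instance

-- ===== CLAIM (what is proved, stated in full; the proofs are below) =====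
def Claim_equal_check_variable_depths : Prop := ∀ (expression : String), Dom_check_variable_depths expression → Spec_check_variable_depths expression (check_variable_depths expression)

-- ===== LEMMAS AND PROOFS =====

-- recursive restatement of B's lexer fold
def pvLexRec : List Char → Bool → List Char → List PvTok
  | [], _, buf => pvFlush buf
  | c :: rest, inq, buf =>
    if inq then pvLexRec rest (c != '"') buf
    else if (c.isAlphanum || c == '_') && (!buf.isEmpty || c == '_' || c.isAlpha) then
      pvLexRec rest false (buf ++ [c])
    else
      pvFlush buf ++
        (if c == '"' then pvLexRec rest true []
         else if c == '{' then PvTok.op :: pvLexRec rest false []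
         else if c == '}' then PvTok.cl :: pvLexRec rest false []
         else pvLexRec rest false [])

theorem pvLex_fold (cs : List Char) : ∀ (toks : List PvTok) (buf : List Char) (inq : Bool),
    (cs.foldl pvBStep (toks, buf, inq)).1 ++ pvFlush (cs.foldl pvBStep (toks, buf, inq)).2.1
      = toks ++ pvLexRec cs inq buf := by
  induction cs with
  | nil => intro toks buf inq; simp [pvLexRec]
  | cons c rest ih =>
    intro toks buf inq
    simp only [List.foldl_cons, pvBStep, pvLexRec]
    cases inq with
    | true => simp only [if_pos trivial] at *; rw [ih]
    | false =>
      simp only [Bool.false_eq_true, if_false]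
      by_cases hc : ((c.isAlphanum || c == '_') && (!buf.isEmpty || c == '_' || c.isAlpha)) = true
      · simp only [if_pos hc]; rw [ih]
      · simp only [if_neg hc]
        by_cases h1 : (c == '"') = true
        · simp only [if_pos h1]; rw [ih, List.append_assoc]
        · simp only [if_neg h1]
          by_cases h2 : (c == '{') = true
          · simp only [if_pos h2]; rw [ih]; simp [List.append_assoc]
          · simp only [if_neg h2]
            by_cases h3 : (c == '}') = true
            · simp only [if_pos h3]; rw [ih]; simp [List.append_assoc]
            · simp only [if_neg h3]; rw [ih, List.append_assoc]

theorem pvBLex_eq (cs : List Char) : pvBLex cs = pvLexRec cs false [] := by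
  have := pvLex_fold cs [] [] false
  simpa [pvBLex] using this

theorem pvAQuote_ge (cs : List Char) : ∀ (fuel i : Nat), i ≤ pvAQuote cs fuel i := by
  intro fuel
  induction fuel with
  | zero => intro i; simp [pvAQuote]
  | succ fuel ih =>
    intro i
    rw [pvAQuote]
    split
    · split
      · exact Nat.le_refl i
      · have := ih (i + 1); omega
    · exact Nat.le_refl i

theorem pvAScan_ge (cs : List Char) : ∀ (fuel i : Nat), i ≤ pvAScan cs fuel i := by
  intro fuel
  induction fuel with
  | zero => intro i; simp [pvAScan]
  | succ fuel ih =>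
    intro i
    rw [pvAScan]
    split
    · split
      · have := ih (i + 1); omega
      · exact Nat.le_refl i
    · exact Nat.le_refl i

-- the scanner's result does not depend on the fuel once the fuel covers the remaining string
theorem pvAScan_congr (cs : List Char) : ∀ (f f' i : Nat), cs.length - i ≤ f → cs.length - i ≤ f' →
    pvAScan cs f i = pvAScan cs f' i := by
  intro f
  induction f with
  | zero =>
    intro f' i hf hf'
    have hi : cs.length ≤ i := by omega
    rw [pvAScan]
    cases f' with
    | zero => rfl
    | succ f' => rw [pvAScan, dif_neg (by omega)]
  | succ f ih =>
    intro f' i hf hf'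
    by_cases hi : i < cs.length
    · cases f' with
      | zero => omega
      | succ f' =>
        rw [pvAScan, pvAScan, dif_pos hi, dif_pos hi]
        by_cases hc : (cs[i].isAlphanum || cs[i] == '_') = true
        · rw [if_pos hc, if_pos hc]
          exact ih f' (i + 1) (by omega) (by omega)
        · rw [if_neg hc, if_neg hc]
    · cases f' with
      | zero => rw [pvAScan, pvAScan, dif_neg hi]
      | succ f' => rw [pvAScan, pvAScan, dif_neg hi, dif_neg hi]

-- quote skipping: the in-quote lexer state lands where A's inner while lands
theorem pvQuote_lemma (cs : List Char) : ∀ (fuel k : Nat) (buf : List Char), cs.length - k ≤ fuel →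
    pvLexRec (cs.drop k) true buf = pvLexRec (cs.drop (pvAQuote cs fuel k + 1)) false buf := by
  intro fuel
  induction fuel with
  | zero =>
    intro k buf hn
    have hk : cs.length ≤ k := by omega
    rw [pvAQuote]
    simp [List.drop_eq_nil_of_le hk, List.drop_eq_nil_of_le (by omega : cs.length ≤ k + 1), pvLexRec]
  | succ fuel ih =>
    intro k buf hn
    by_cases hk : k < cs.length
    · rw [List.drop_eq_getElem_cons hk, pvAQuote, dif_pos hk]
      by_cases hc : (cs[k] == '"') = true
      · have hne : (cs[k] != '"') = false := by simpa using hc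
        simp only [if_pos hc, pvLexRec, hne]
        simp
      · simp only [if_neg hc, pvLexRec]
        have hne : (cs[k] != '"') = true := by simpa using hc
        rw [hne]
        exact ih (k + 1) buf (by omega)
    · rw [pvAQuote, dif_neg hk]
      simp [List.drop_eq_nil_of_le (by omega : cs.length ≤ k),
            List.drop_eq_nil_of_le (by omega : cs.length ≤ k + 1), pvLexRec]

-- token scanning: the buffered lexer state emits exactly A's sliced token
theorem pvScan_lemma (cs : List Char) : ∀ (fuel k : Nat) (buf : List Char), cs.length - k ≤ fuel →
    buf ≠ [] →
    pvLexRec (cs.drop k) false buf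
      = PvTok.name (String.mk (buf ++ (cs.drop k).take (pvAScan cs fuel k - k)))
          :: pvLexRec (cs.drop (pvAScan cs fuel k)) false [] := by
  intro fuel
  induction fuel with
  | zero =>
    intro k buf hn hb
    have hk : cs.length ≤ k := by omega
    rw [pvAScan]
    simp [List.drop_eq_nil_of_le hk, pvLexRec, pvFlush, hb]
  | succ fuel ih =>
    intro k buf hn hb
    by_cases hk : k < cs.length
    · rw [List.drop_eq_getElem_cons hk, pvAScan, dif_pos hk]
      by_cases hc : (cs[k].isAlphanum || cs[k] == '_') = true
      · rw [if_pos hc]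
        have hbuf : (!buf.isEmpty) = true := by
          simp [List.isEmpty_iff, hb]
        have hcond : ((cs[k].isAlphanum || cs[k] == '_')
            && (!buf.isEmpty || cs[k] == '_' || cs[k].isAlpha)) = true := by
          simp [hc, hbuf]
        conv_lhs => rw [pvLexRec]
        simp only [Bool.false_eq_true, if_false, if_pos hcond]
        have hge : k + 1 ≤ pvAScan cs fuel (k + 1) := pvAScan_ge cs fuel (k + 1)
        rw [ih (k + 1) (buf ++ [cs[k]]) (by omega) (by simp)]
        congr 3
        have h1 : pvAScan cs fuel (k + 1) - k = (pvAScan cs fuel (k + 1) - (k + 1)) + 1 := by omega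
        rw [h1, List.take_succ_cons]
        simp
      · rw [if_neg hc]
        simp only [Bool.or_eq_true, not_or, Bool.not_eq_true] at hc
        have hbuf : buf.isEmpty = false := by simp [List.isEmpty_iff, hb]
        conv_lhs => rw [pvLexRec]
        rw [List.drop_eq_getElem_cons hk]
        conv_rhs => rw [pvLexRec]
        simp only [Bool.false_eq_true, if_false, Nat.sub_self, List.take_zero, List.append_nil]
        simp [pvFlush, hbuf, hc.1, hc.2]
    · rw [pvAScan, dif_neg hk]
      simp [List.drop_eq_nil_of_le (by omega : cs.length ≤ k), pvLexRec, pvFlush, hb]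

-- helper for pvDict_step: re-inserting an absent key twice collapses
theorem pvInsert_insert (d : PySem.Dict String (List Int)) (k : String) (v1 v2 : List Int)
    (h : d.contains k = false) : (d.insert k v1).insert k v2 = d.insert k v2 := by
  apply PySem.Dict.ext
  rw [PySem.Dict.items_insert_of_contains _ _ (PySem.Dict.contains_insert_self d k v1),
      PySem.Dict.items_insert_of_not_contains _ _ h,
      PySem.Dict.items_insert_of_not_contains _ _ h, List.map_append]
  have hmem : ∀ p ∈ d.items, p.1 ≠ k := by
    intro p hp hk
    have : k ∈ d.keys := by
      simp only [PySem.Dict.keys]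
      exact hk ▸ List.mem_map_of_mem hp
    rw [← PySem.Dict.contains_iff_mem_keys] at this
    simp [h] at this
  have hid : List.map (fun p => if (p.1 == k) = true then (k, v2) else p) d.items = d.items := by
    conv_rhs => rw [← List.map_id d.items]
    exact List.map_congr_left (fun p hp => by simp [hmem p hp])
  rw [hid]
  simp

-- A's two-step dict update is B's single modify
theorem pvDict_step (d : PySem.Dict String (List Int)) (token : String) (depth : Int) :
    ((if d.contains token then d else d.insert token []).insert token
        ((if d.contains token then d else d.insert token []).getD token [] ++ [depth]))
      = d.modify token [] (fun l => l ++ [depth]) := by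
  show _ = d.insert token (d.getD token [] ++ [depth])
  by_cases hc : d.contains token = true
  · simp only [hc, if_true]
  · have hc' : d.contains token = false := by simpa using hc
    simp only [hc', Bool.false_eq_true, if_false]
    rw [PySem.Dict.getD_insert_self, PySem.Dict.getD_of_not_contains _ _ hc']
    exact pvInsert_insert d token [] ([] ++ [depth]) hc'

theorem pvMain (cs : List Char) : ∀ (fuel i : Nat) (depth : Int)
    (d : PySem.Dict String (List Int)), cs.length - i ≤ fuel →
    pvALoop cs fuel i depth d = ((pvLexRec (cs.drop i) false []).foldl pvBEvalStep (depth, d)).2 := by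
  intro fuel
  induction fuel with
  | zero =>
    intro i depth d hn
    rw [pvALoop]
    simp [List.drop_eq_nil_of_le (by omega : cs.length ≤ i), pvLexRec, pvFlush]
  | succ fuel ih =>
    intro i depth d hn
    by_cases hi : i < cs.length
    · rw [pvALoop, dif_pos hi, List.drop_eq_getElem_cons hi]
      by_cases h1 : (cs[i] == '"') = true
      · have hceq : cs[i] = '"' := by simpa using h1
        simp only [if_pos h1, pvLexRec, hceq]
        norm_num
        rw [pvQuote_lemma cs cs.length (i + 1) [] (by omega)]
        have := pvAQuote_ge cs cs.length (i + 1)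
        exact ih (pvAQuote cs cs.length (i + 1) + 1) depth d (by omega)
      · simp only [if_neg h1]
        by_cases h2 : (cs[i] == '{') = true
        · have hceq : cs[i] = '{' := by simpa using h2
          simp only [if_pos h2, pvLexRec, hceq]
          norm_num [pvFlush, pvBEvalStep]
          exact ih (i + 1) (depth + 1) d (by omega)
        · simp only [if_neg h2]
          by_cases h3 : (cs[i] == '}') = true
          · have hceq : cs[i] = '}' := by simpa using h3
            simp only [if_pos h3, pvLexRec, hceq]
            norm_num [pvFlush, pvBEvalStep]
            exact ih (i + 1) (depth - 1) d (by omega)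
          · simp only [if_neg h3]
            by_cases h4 : (cs[i].isAlpha || cs[i] == '_') = true
            · rw [if_pos h4]
              have h4' := h4
              simp only [Bool.or_eq_true] at h4'
              have halnum : (cs[i].isAlphanum || cs[i] == '_') = true := by
                simp only [Bool.or_eq_true, Char.isAlphanum] at h4 ⊢
                tauto
              have hge : i + 1 ≤ pvAScan cs cs.length (i + 1) := pvAScan_ge cs cs.length (i + 1)
              have hscan : pvAScan cs cs.length i = pvAScan cs cs.length (i + 1) := by
                conv_lhs => rw [show cs.length = (cs.length - 1) + 1 from by omega]
                rw [pvAScan, dif_pos hi, if_pos halnum]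
                exact pvAScan_congr cs (cs.length - 1) cs.length (i + 1) (by omega) (by omega)
              have hcond : ((cs[i].isAlphanum || cs[i] == '_')
                  && (!(List.isEmpty ([] : List Char)) || cs[i] == '_' || cs[i].isAlpha)) = true := by
                rcases h4' with h4' | h4' <;> simp [halnum, h4']
              conv_rhs => rw [pvLexRec]
              simp only [Bool.false_eq_true, if_false, if_pos hcond, List.nil_append]
              rw [pvScan_lemma cs cs.length (i + 1) [cs[i]] (by omega) (by simp)]
              simp only [List.foldl_cons, pvBEvalStep]
              have htok : String.mk ((cs[i] :: cs.drop (i + 1)).take (pvAScan cs cs.length i - i))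
                  = String.mk ([cs[i]] ++ (cs.drop (i + 1)).take (pvAScan cs cs.length (i + 1) - (i + 1))) := by
                congr 1
                rw [hscan]
                have h5 : pvAScan cs cs.length (i + 1) - i = (pvAScan cs cs.length (i + 1) - (i + 1)) + 1 := by omega
                rw [h5, List.take_succ_cons]
                simp
              rw [← htok, ← hscan]
              rw [pvDict_step d (String.mk ((cs[i] :: cs.drop (i + 1)).take (pvAScan cs cs.length i - i))) depth]
              exact ih (pvAScan cs cs.length i) depth _ (by omega)
            · rw [if_neg h4]
              simp only [Bool.or_eq_true, not_or, Bool.not_eq_true] at h4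
              conv_rhs => rw [pvLexRec]
              simp only [Bool.false_eq_true, if_false]
              rw [if_neg (by simp [h4.1, h4.2]), if_neg h1, if_neg h2, if_neg h3]
              simp only [pvFlush, List.isEmpty_nil, if_true, List.nil_append]
              exact ih (i + 1) depth d (by omega)
    · rw [pvALoop, dif_neg hi]
      simp [List.drop_eq_nil_of_le (by omega : cs.length ≤ i), pvLexRec, pvFlush]

-- ===== VERDICT (by name: the statement is the Claim_ definition above) =====
theorem check_variable_depths_spec : Claim_equal_check_variable_depths := by
  intro expression _
  unfold Spec_check_variable_depths check_variable_depths check_variable_depths_alt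
  rw [pvBLex_eq]
  have := pvMain expression.toList expression.toList.length 0 0 PySem.Dict.empty (by omega)
  simp only [List.drop_zero] at this
  rw [this]
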